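-- pv_equiv track=rewrite | github.com/Bridgit-SPC/brc333 | Goblins/analysisBlock.py | find_power_of_7
-- ===== SOURCE A (Python) =====
-- def is_power_of_7(n):
--     if n <= 0:
--         return False
--     while n % 7 == 0:
--         n //= 7
--     return n == 1
--
-- def find_power_of_7(values):
--     matching_values = []
--     for value in values:
--         try:
--             if is_power_of_7(int(value)):
--                 matching_values.append(value)
--         except ValueError:
--             continue
--     count = len(matching_values)
--     return matching_values, count
-- ===== SOURCE B (Python) =====
-- def _to_int(s):
--     try:
--         return int(s)
--     except ValueError:
--         return None
--
-- def _is_pow7(n):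
--     # climb through powers of 7 instead of dividing n down
--     p = 1
--     while p < n:
--         p *= 7
--     return p == n
--
-- def find_power_of_7(values):
--     matching_values = [v for v in values
--                        if (i := _to_int(v)) is not None and _is_pow7(i)]
--     return matching_values, len(matching_values)
-- ===== Notes on version B (the rewrite author's own statement) =====
-- stated objective: simpler
-- what changed: is_power_of_7's divide-n-down-by-7 loop (with a sign pre-check) is replaced by climbing an independent power 1,7,49,... up to n and comparing exactly (no sign check needed), and the accumulator loop with try/except becomes a comprehension over a total parse helper.
import Mathlib
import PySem

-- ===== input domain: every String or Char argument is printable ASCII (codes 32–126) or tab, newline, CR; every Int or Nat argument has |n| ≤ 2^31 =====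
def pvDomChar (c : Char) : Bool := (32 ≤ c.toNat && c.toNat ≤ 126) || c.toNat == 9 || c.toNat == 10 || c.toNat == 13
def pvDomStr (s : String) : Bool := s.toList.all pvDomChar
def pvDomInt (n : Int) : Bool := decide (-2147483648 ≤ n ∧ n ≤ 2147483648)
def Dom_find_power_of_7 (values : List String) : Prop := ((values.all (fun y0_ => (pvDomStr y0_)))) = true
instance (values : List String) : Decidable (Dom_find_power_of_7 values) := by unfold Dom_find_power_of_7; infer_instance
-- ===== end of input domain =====

-- B replaces the divide-n-down-by-7 loop (with its sign pre-check) by climbing powers 1,7,49,… up to n,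
-- and the accumulating loop with try/except by a comprehension over a total parse helper; same cost (simpler).


-- ===== PORT A =====
-- 'while n % 7 == 0: n //= 7' ; fuel = n.toNat only makes the loop total (for n ≥ 1 it terminates in ≤ log₇ n ≤ n.toNat steps)
def isPow7DivLoop (fuel : Nat) (n : Int) : Int :=
  match fuel with
  | 0 => n
  | f + 1 => if PySem.Int.mod n 7 == 0 then isPow7DivLoop f (PySem.Int.floordiv n 7) else n

def is_power_of_7 (n : Int) : Bool :=
  if n ≤ 0 then false else isPow7DivLoop n.toNat n == 1

def find_power_of_7 (values : List String) : List String × Int :=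
  let matching_values := values.foldl (fun acc value =>
    match PySem.Int.ofStr? value with         -- try: int(value) … except ValueError: continue
    | some i => if is_power_of_7 i then acc ++ [value] else acc
    | none => acc) []
  (matching_values, (matching_values.length : Int))

-- ===== PORT B =====
-- 'p = 1; while p < n: p *= 7; return p == n' ; fuel = n.toNat + 1 only makes the loop total
def isPow7MulLoop (fuel : Nat) (p n : Int) : Bool :=
  match fuel with
  | 0 => p == n
  | f + 1 => if p < n then isPow7MulLoop f (p * 7) n else p == n

def isPow7Alt (n : Int) : Bool := isPow7MulLoop (n.toNat + 1) 1 n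

def find_power_of_7_alt (values : List String) : List String × Int :=
  let matching := values.filter (fun v =>
    match PySem.Int.ofStr? v with             -- _to_int: total parse helper
    | some i => isPow7Alt i
    | none => false)
  (matching, (matching.length : Int))

-- ===== PRECONDITION & SPEC =====
def Spec_find_power_of_7 (values : List String) (out : List String × Int) : Prop := out = find_power_of_7_alt values
instance (values : List String) (out : List String × Int) : Decidable (Spec_find_power_of_7 values out) := by unfold Spec_find_power_of_7; infer_instance

-- ===== CLAIM (what is proved, stated in full; the proofs are below) =====
def Claim_equal_find_power_of_7 : Prop := ∀ (values : List String), Dom_find_power_of_7 values → Spec_find_power_of_7 values (find_power_of_7 values)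

-- ===== LEMMAS AND PROOFS =====

theorem seven_pow_gt (m : Nat) : (m : Int) < 7 ^ m := by
  induction m with
  | zero => norm_num
  | succ k ih =>
    have : (7:Int) ^ (k+1) = 7 * 7 ^ k := by ring
    have h7 : (0:Int) < 7 ^ k := by positivity
    push_cast
    omega

theorem divLoop_iff (fuel : Nat) : ∀ (n : Int), 1 ≤ n → n ≤ 7 ^ fuel →
    (isPow7DivLoop fuel n = 1 ↔ ∃ k : Nat, (7:Int) ^ k = n) := by
  induction fuel with
  | zero =>
    intro n h1 hle
    have : n = 1 := by simpa using le_antisymm hle h1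
    subst this
    simp [isPow7DivLoop]
    exact ⟨0, by norm_num⟩
  | succ f ih =>
    intro n h1 hle
    by_cases hdvd : (7:Int) ∣ n
    · have hmod : PySem.Int.mod n 7 = 0 := (PySem.Int.mod_eq_zero_iff_dvd n 7).mpr hdvd
      obtain ⟨m, hm⟩ := id hdvd
      have hm1 : 1 ≤ m := by nlinarith
      have hfd : PySem.Int.floordiv n 7 = m := by
        rw [PySem.Int.floordiv_eq_ediv_of_pos (by norm_num)]
        simp [hm]
      have hmle : m ≤ 7 ^ f := by
        have : (7:Int) ^ (f+1) = 7 * 7 ^ f := by ring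
        nlinarith
      rw [isPow7DivLoop, if_pos (by rw [hmod]; rfl), hfd]
      rw [ih m hm1 hmle]
      constructor
      · rintro ⟨k, hk⟩; exact ⟨k + 1, by rw [pow_succ]; nlinarith⟩
      · rintro ⟨k, hk⟩
        match k with
        | 0 => exact absurd (show n = 1 by simpa using hk.symm) (by omega)
        | j + 1 =>
          refine ⟨j, ?_⟩
          have : (7:Int) ^ (j+1) = 7 * 7 ^ j := by ring
          nlinarith
    · have hmod : ¬ PySem.Int.mod n 7 = 0 := fun h => hdvd ((PySem.Int.mod_eq_zero_iff_dvd n 7).mp h)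
      rw [isPow7DivLoop, if_neg (by simpa using hmod)]
      constructor
      · intro h; exact ⟨0, by simpa using h.symm⟩
      · rintro ⟨k, hk⟩
        match k with
        | 0 => simpa using hk.symm
        | j + 1 => exact absurd ⟨7 ^ j, by rw [← hk]; ring⟩ hdvd

theorem mulLoop_iff (fuel : Nat) : ∀ (p n : Int), 1 ≤ p → n < p * 7 ^ fuel →
    (isPow7MulLoop fuel p n = true ↔ ∃ k : Nat, p * (7:Int) ^ k = n) := by
  induction fuel with
  | zero =>
    intro p n hp hlt
    simp only [pow_zero, mul_one] at hlt
    simp only [isPow7MulLoop, beq_iff_eq]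
    constructor
    · intro h; omega
    · rintro ⟨k, hk⟩
      have h7 : (1:Int) ≤ 7 ^ k := one_le_pow₀ (by norm_num)
      nlinarith
  | succ f ih =>
    intro p n hp hlt
    rw [isPow7MulLoop]
    by_cases hlt' : p < n
    · rw [if_pos (by exact_mod_cast hlt')]
      have hbound : n < p * 7 * 7 ^ f := by
        have : (7:Int) ^ (f+1) = 7 * 7 ^ f := by ring
        nlinarith
      rw [ih (p * 7) n (by nlinarith) hbound]
      constructor
      · rintro ⟨k, hk⟩; exact ⟨k + 1, by rw [pow_succ]; nlinarith⟩
      · rintro ⟨k, hk⟩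
        match k with
        | 0 => exfalso; simp at hk; omega
        | j + 1 =>
          refine ⟨j, ?_⟩
          have : (7:Int) ^ (j+1) = 7 * 7 ^ j := by ring
          nlinarith
    · rw [if_neg (by exact_mod_cast hlt')]
      push Not at hlt'
      simp only [beq_iff_eq]
      constructor
      · intro h; exact ⟨0, by simpa using h⟩
      · rintro ⟨k, hk⟩
        match k with
        | 0 => simpa using hk
        | j + 1 =>
          exfalso
          have h7 : (1:Int) ≤ 7 ^ j := one_le_pow₀ (by norm_num)
          have : (7:Int) ^ (j+1) = 7 * 7 ^ j := by ring
          nlinarith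

theorem isPow_eq (n : Int) : is_power_of_7 n = isPow7Alt n := by
  unfold is_power_of_7 isPow7Alt
  by_cases hn : n ≤ 0
  · rw [if_pos hn]
    have hb : n < 1 * 7 ^ (n.toNat + 1) := by
      have : (0:Int) < 7 ^ (n.toNat + 1) := by positivity
      omega
    have := mulLoop_iff (n.toNat + 1) 1 n le_rfl hb
    rcases h : isPow7MulLoop (n.toNat + 1) 1 n with _ | _
    · rfl
    · exfalso
      obtain ⟨k, hk⟩ := this.mp h
      have h7 : (1:Int) ≤ 7 ^ k := one_le_pow₀ (by norm_num)
      omega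
  · rw [if_neg hn]
    push Not at hn
    have h1 : 1 ≤ n := hn
    have hcast : (n.toNat : Int) = n := Int.toNat_of_nonneg (by omega)
    have hA : n ≤ 7 ^ n.toNat := by
      have := seven_pow_gt n.toNat
      omega
    have hB : n < 1 * 7 ^ (n.toNat + 1) := by
      have h7 : (7:Int) ^ (n.toNat + 1) = 7 * 7 ^ n.toNat := by ring
      have hpos : (0:Int) < 7 ^ n.toNat := by positivity
      nlinarith
    have hAiff := divLoop_iff n.toNat n h1 hA
    have hBiff := mulLoop_iff (n.toNat + 1) 1 n le_rfl hB
    simp only [one_mul] at hBiff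
    rcases hA' : isPow7DivLoop n.toNat n == 1 with _ | _ <;>
      rcases hB' : isPow7MulLoop (n.toNat + 1) 1 n with _ | _
    · rfl
    · exfalso
      have := hAiff.mpr (hBiff.mp hB')
      simp at hA'
      exact hA' this
    · exfalso
      have := hBiff.mpr (hAiff.mp (by simpa using hA'))
      simp [hB'] at this
    · rfl

theorem fold_eq_filter (values : List String) :
    values.foldl (fun acc value =>
      match PySem.Int.ofStr? value with
      | some i => if is_power_of_7 i then acc ++ [value] else acc
      | none => acc) [] =
    values.filter (fun v =>
      match PySem.Int.ofStr? v with
      | some i => isPow7Alt i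
      | none => false) := by
  have hbody : (fun (acc : List String) value =>
      match PySem.Int.ofStr? value with
      | some i => if is_power_of_7 i then acc ++ [value] else acc
      | none => acc) =
      (fun acc value => if (match PySem.Int.ofStr? value with
        | some i => isPow7Alt i
        | none => false) then acc ++ [value] else acc) := by
    funext acc value
    rcases PySem.Int.ofStr? value with _ | i
    · simp
    · simp [isPow_eq]
  rw [hbody, PySem.List.foldl_append_if_eq_filter]
  simp

-- ===== VERDICT (by name: the statement is the Claim_ definition above) =====
theorem find_power_of_7_spec : Claim_equal_find_power_of_7 := by
  intro values _
  show _ = _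
  unfold find_power_of_7 find_power_of_7_alt
  rw [fold_eq_filter]
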